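-- pv_equiv track=rewrite | github.com/AbsaOSS/organizational-workflows | github/security/promote_alerts.py | render_sec_event
-- ===== SOURCE A (Python) =====
-- def render_sec_event(fields: dict[str, str]) -> str:
--     preferred_order = [
--         "action",
--         "seen_at",
--         "source",
--         "gh_alert_number",
--         "occurrence_fp",
--         "commit_sha",
--         "path",
--         "start_line",
--         "end_line",
--     ]
--     lines: list[str] = ["[sec-event]"]
--     for k in preferred_order:
--         if k in fields and str(fields.get(k, "")).strip() != "":
--             lines.append(f"{k}={fields.get(k, '')}")
--     for k in sorted(k for k in fields.keys() if k not in set(preferred_order)):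
--         v = str(fields.get(k, ""))
--         if v.strip() == "":
--             continue
--         lines.append(f"{k}={v}")
--     lines.append("[/sec-event]")
--     return "\n".join(lines) + "\n"
-- ===== SOURCE B (Python) =====
-- def render_sec_event(fields: dict[str, str]) -> str:
--     preferred_order = [
--         "action",
--         "seen_at",
--         "source",
--         "gh_alert_number",
--         "occurrence_fp",
--         "commit_sha",
--         "path",
--         "start_line",
--         "end_line",
--     ]
--     idx = {k: i for i, k in enumerate(preferred_order)}
--     n = len(preferred_order)
--     keys = sorted(fields, key=lambda k: (idx.get(k, n), "" if k in idx else k))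
--     body = [f"{k}={fields[k]}" for k in keys if str(fields[k]).strip() != ""]
--     return "\n".join(["[sec-event]", *body, "[/sec-event]"]) + "\n"
-- ===== Notes on version B (the rewrite author's own statement) =====
-- stated objective: alternative
-- what changed: Replaces A's two separate key passes (a scan over the preferred-order list plus a separate sort of the remaining keys) by one sort of all of the dict's keys under a composite (preferred-rank, tiebreak-name) key followed by a single filtered pass that builds the body lines.
import Mathlib
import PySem

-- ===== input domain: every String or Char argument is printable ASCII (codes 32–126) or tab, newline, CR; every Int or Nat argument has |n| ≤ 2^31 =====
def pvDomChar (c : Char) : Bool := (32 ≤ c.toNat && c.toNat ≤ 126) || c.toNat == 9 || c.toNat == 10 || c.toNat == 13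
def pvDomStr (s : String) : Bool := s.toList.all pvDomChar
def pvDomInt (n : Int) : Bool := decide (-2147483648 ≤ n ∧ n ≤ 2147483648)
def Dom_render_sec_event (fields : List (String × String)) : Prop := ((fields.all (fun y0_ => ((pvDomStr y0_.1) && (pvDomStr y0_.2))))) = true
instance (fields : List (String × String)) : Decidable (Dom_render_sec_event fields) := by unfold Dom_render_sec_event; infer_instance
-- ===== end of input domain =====

-- B replaces A's two separate key passes (preferred-order scan + sort of the rest) by ONE
-- sort of all keys under a composite (rank, tiebreak) key and a single filtered pass;
-- objective: alternative decomposition.  Equality of the RETURN value is what is proved.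

-- shared constant: the module's preferred key order
def pvPref : List String :=
  ["action", "seen_at", "source", "gh_alert_number", "occurrence_fp",
   "commit_sha", "path", "start_line", "end_line"]

-- fields.get(k, "") on the association list (first match; dict keys are unique)
def pvGet (fields : List (String × String)) (k : String) : String :=
  (List.lookup k fields).getD ""

-- ===== PORT A =====
def render_sec_event (fields : List (String × String)) : String :=
  let lines : List String := ["[sec-event]"]
  let lines := pvPref.foldl (fun acc k =>
    if (fields.map Prod.fst).contains k && (PySem.Str.strip (pvGet fields k) != "") then
      acc ++ [PySem.Str.join "" [k, "=", pvGet fields k]]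
    else acc) lines
  let lines := (PySem.List.sorted
      ((PySem.List.dedup (fields.map Prod.fst)).filter (fun k => !pvPref.contains k))
      (fun k => k) false).foldl (fun acc k =>
    let v := pvGet fields k
    if PySem.Str.strip v == "" then acc
    else acc ++ [PySem.Str.join "" [k, "=", v]]) lines
  let lines := lines ++ ["[/sec-event]"]
  PySem.Str.join "\n" lines ++ "\n"

-- ===== PORT B =====
-- idx.get(k, n): rank of k in the preferred order, n = 9 for the rest
def pvRank (k : String) : Nat := (PySem.List.index? pvPref k).getD pvPref.length
-- '' if k in idx else k
def pvTie (k : String) : String := if pvPref.contains k then "" else k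

def render_sec_event_alt (fields : List (String × String)) : String :=
  let keys := PySem.List.sorted2 (PySem.List.dedup (fields.map Prod.fst)) pvRank pvTie false
  let body := (keys.filter (fun k => PySem.Str.strip (pvGet fields k) != "")).map
    (fun k => PySem.Str.join "" [k, "=", pvGet fields k])
  PySem.Str.join "\n" (["[sec-event]"] ++ body ++ ["[/sec-event]"]) ++ "\n"

-- ===== PRECONDITION & SPEC =====
def Spec_render_sec_event (fields : List (String × String)) (out : String) : Prop := out = render_sec_event_alt fields
instance (fields : List (String × String)) (out : String) : Decidable (Spec_render_sec_event fields out) := by unfold Spec_render_sec_event; infer_instance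

-- ===== CLAIM (what is proved, stated in full; the proofs are below) =====
def Claim_equal_render_sec_event : Prop := ∀ (fields : List (String × String)), Dom_render_sec_event fields → Spec_render_sec_event fields (render_sec_event fields)

-- ===== LEMMAS AND PROOFS =====

-- the composite key, packaged as one lexicographic key
def pvKey (k : String) : Lex (Nat × String) := toLex (pvRank k, pvTie k)

theorem pvRank_lt_of_mem {k : String} (h : k ∈ pvPref) : pvRank k < pvPref.length := by
  unfold pvRank
  cases hidx : PySem.List.index? pvPref k with
  | none => exact absurd h ((PySem.List.index?_eq_none_iff _ _).mp hidx)
  | some i =>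
    obtain ⟨hk, -, -⟩ := PySem.List.getElem_of_index?_eq_some hidx
    simpa using hk

theorem pvRank_of_not_mem {k : String} (h : k ∉ pvPref) : pvRank k = pvPref.length := by
  unfold pvRank
  rw [(PySem.List.index?_eq_none_iff _ _).mpr h]
  rfl

-- sorted2 with (pvRank, pvTie) IS the sort by the single lexicographic key pvKey
theorem sorted2_eq_sorted_key (xs : List String) :
    PySem.List.sorted2 xs pvRank pvTie false = PySem.List.sorted xs pvKey false := by
  have hbef : (fun a b => decide (pvRank a < pvRank b)
        || (!decide (pvRank b < pvRank a) && decide (pvTie a < pvTie b)))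
      = (fun a b => decide (pvKey a < pvKey b)) := by
    funext a b
    by_cases h1 : pvRank a < pvRank b
    · simp [pvKey, Prod.Lex.lt_iff, ofLex_toLex, h1]
    · by_cases h2 : pvRank b < pvRank a
      · simp [pvKey, Prod.Lex.lt_iff, ofLex_toLex, h1, h2]
        omega
      · have heq : pvRank a = pvRank b := Nat.le_antisymm (Nat.le_of_not_lt h2) (Nat.le_of_not_lt h1)
        simp [pvKey, Prod.Lex.lt_iff, ofLex_toLex, heq]
  unfold PySem.List.sorted2 PySem.List.sorted
  dsimp only
  simp only [if_neg Bool.false_ne_true]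
  rw [hbef]

-- the unified sort splits into A's two blocks
theorem keys_split (fields : List (String × String)) :
    PySem.List.sorted2 (PySem.List.dedup (fields.map Prod.fst)) pvRank pvTie false
    = pvPref.filter (fun k => (fields.map Prod.fst).contains k)
      ++ PySem.List.sorted
          ((PySem.List.dedup (fields.map Prod.fst)).filter (fun k => !pvPref.contains k))
          (fun k => k) false := by
  rw [sorted2_eq_sorted_key]
  set allkeys := PySem.List.dedup (fields.map Prod.fst) with hak
  have hndall : allkeys.Nodup := by
    rw [hak, PySem.List.dedup_eq_ofList]; exact PySem.Set.nodup_ofList _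
  have hmemall : ∀ k, k ∈ allkeys ↔ k ∈ fields.map Prod.fst := by
    intro k; rw [hak, PySem.List.dedup_eq_ofList]; exact PySem.Set.mem_ofList _ _
  set P := pvPref.filter (fun k => (fields.map Prod.fst).contains k) with hP
  set S := PySem.List.sorted (allkeys.filter (fun k => !pvPref.contains k)) (fun k => k) false with hS
  apply PySem.List.sorted_eq_of_perm_of_pairwise_lt
  · -- (P ++ S).Perm allkeys
    have h1 : P.Perm (allkeys.filter (fun k => pvPref.contains k)) := by
      apply List.perm_of_nodup_nodup_toFinset_eq
      · exact (by decide : pvPref.Nodup).filter _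
      · exact hndall.filter _
      · ext k
        simp only [hP, List.mem_toFinset, List.mem_filter, List.contains_iff_mem, hmemall]
        tauto
    have h2 : S.Perm (allkeys.filter (fun k => !pvPref.contains k)) := by
      rw [hS]; exact PySem.List.sorted_perm _ _ _
    exact (h1.append h2).trans (List.filter_append_perm _ _)
  · -- strictly increasing under pvKey
    rw [List.pairwise_append]
    refine ⟨?_, ?_, ?_⟩
    · -- within the preferred block: strictly increasing ranks
      have hp : pvPref.Pairwise (fun a b => pvKey a < pvKey b) := by
        have : pvPref.Pairwise (fun a b => pvRank a < pvRank b) := by decide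
        exact this.imp (fun h => by
          simp only [pvKey, Prod.Lex.lt_iff]; exact Or.inl h)
      exact List.Pairwise.sublist List.filter_sublist hp
    · -- within the sorted rest: equal ranks, strictly increasing names
      have hle : S.Pairwise (fun a b => a ≤ b) := by
        rw [hS]
        exact PySem.List.sorted_pairwise (allkeys.filter (fun k => !pvPref.contains k)) (fun k => k)
      have hnd : S.Nodup := by
        rw [hS]
        exact ((PySem.List.sorted_perm _ _ _).nodup_iff).mpr (hndall.filter _)
      have hmemS : ∀ k ∈ S, k ∉ pvPref := by
        rw [hS]
        intro k hk
        have hk2 := (PySem.List.mem_sorted _ _ _ _).mp hk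
        have := List.mem_filter.mp hk2
        simpa using this.2
      refine (hle.and hnd).imp_of_mem ?_
      intro a b ha hb hab
      have hlt : a < b := lt_of_le_of_ne hab.1 hab.2
      simp only [pvKey, Prod.Lex.lt_iff, ofLex_toLex]
      right
      refine ⟨by rw [pvRank_of_not_mem (hmemS a ha), pvRank_of_not_mem (hmemS b hb)], ?_⟩
      simpa [pvTie, hmemS a ha, hmemS b hb] using hlt
    · -- preferred block strictly before the rest: rank < 9 = rank
      intro a ha b hb
      have haP : a ∈ pvPref := (List.mem_filter.mp ha).1
      have hbS : b ∉ pvPref := by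
        rw [hS] at hb
        have hb2 := (PySem.List.mem_sorted _ _ _ _).mp hb
        have := List.mem_filter.mp hb2
        simpa using this.2
      simp only [pvKey, Prod.Lex.lt_iff, ofLex_toLex]
      left
      rw [pvRank_of_not_mem hbS]
      exact pvRank_lt_of_mem haP

-- ===== VERDICT (by name: the statement is the Claim_ definition above) =====
theorem render_sec_event_spec : Claim_equal_render_sec_event := by
  intro fields _
  show render_sec_event fields = render_sec_event_alt fields
  unfold render_sec_event render_sec_event_alt
  simp only []
  rw [keys_split]
  rw [PySem.List.foldl_append_if]
  have hswap : (fun (acc : List String) (k : String) =>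
      if PySem.Str.strip (pvGet fields k) == "" then acc
      else acc ++ [PySem.Str.join "" [k, "=", pvGet fields k]])
    = (fun acc k =>
      if PySem.Str.strip (pvGet fields k) != "" then
        acc ++ [PySem.Str.join "" [k, "=", pvGet fields k]] else acc) := by
    funext acc k
    by_cases hc : PySem.Str.strip (pvGet fields k) = "" <;> simp [hc]
  rw [hswap, PySem.List.foldl_append_if]
  rw [List.filter_append, List.map_append, List.filter_filter]
  have hf : pvPref.filter
        (fun a => (PySem.Str.strip (pvGet fields a) != "") && (fields.map Prod.fst).contains a)
      = pvPref.filter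
        (fun k => (fields.map Prod.fst).contains k && (PySem.Str.strip (pvGet fields k) != "")) :=
    List.filter_congr (fun x _ => Bool.and_comm _ _)
  rw [hf]
  simp [List.append_assoc]
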